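-- pv_equiv track=rewrite | github.com/havyamsh/digital-country-hackathon-bhutan-2025 | AI Avengers/Project/project/agents/tourism_agent.py | _get_cultural_tips
-- ===== SOURCE A (Python) =====
-- def _get_cultural_tips(query: str) -> list:
--     """Provide cultural tips based on query"""
--     tips = []
--     query_lower = query.lower()
--
--     if any(word in query_lower for word in ["temple", "monastery", "dzong", "religious"]):
--         tips.extend([
--             "Dress modestly when visiting religious sites",
--             "Remove shoes before entering temple halls",
--             "Walk clockwise around religious monuments",
--             "Do not point at religious objects"
--         ])
--
--     if any(word in query_lower for word in ["festival", "celebration", "ceremony"]):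
--         tips.extend([
--             "Festivals are deeply spiritual occasions",
--             "Photography may be restricted in some areas",
--             "Participate respectfully as an observer",
--             "Ask permission before taking photos of people"
--         ])
--
--     if any(word in query_lower for word in ["food", "dining", "meal"]):
--         tips.extend([
--             "Try traditional dishes like ema datshi",
--             "Meals are often shared communally",
--             "Use your right hand for eating",
--             "Spicy food is common in Bhutanese cuisine"
--         ])
--
--     # Default cultural tips
--     if not tips:
--         tips = [
--             "Respect local customs and traditions",
--             "Dress modestly, especially in rural areas",
--             "Be mindful of environmental conservation",
--             "Support local communities and businesses"
--         ]
--
--     return tips[:4]  # Limit to top 4 tips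
-- ===== SOURCE B (Python) =====
-- _CATEGORIES = [
--     (("temple", "monastery", "dzong", "religious"), [
--         "Dress modestly when visiting religious sites",
--         "Remove shoes before entering temple halls",
--         "Walk clockwise around religious monuments",
--         "Do not point at religious objects",
--     ]),
--     (("festival", "celebration", "ceremony"), [
--         "Festivals are deeply spiritual occasions",
--         "Photography may be restricted in some areas",
--         "Participate respectfully as an observer",
--         "Ask permission before taking photos of people",
--     ]),
--     (("food", "dining", "meal"), [
--         "Try traditional dishes like ema datshi",
--         "Meals are often shared communally",
--         "Use your right hand for eating",
--         "Spicy food is common in Bhutanese cuisine",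
--     ]),
-- ]
--
-- _DEFAULT_TIPS = [
--     "Respect local customs and traditions",
--     "Dress modestly, especially in rural areas",
--     "Be mindful of environmental conservation",
--     "Support local communities and businesses",
-- ]
--
--
-- def _get_cultural_tips(query: str) -> list:
--     """First matching category wins: since every tip block has exactly 4
--     entries and A truncates to 4, A's result is always the first matching
--     block (or the defaults).  So: no accumulation, no truncation."""
--     query_lower = query.lower()
--     return list(next(
--         (tips for keywords, tips in _CATEGORIES
--          if any(word in query_lower for word in keywords)),
--         _DEFAULT_TIPS,
--     ))
-- ===== Notes on version B (the rewrite author's own statement) =====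
-- stated objective: simpler
-- what changed: B exploits that every tip block has exactly 4 entries and A truncates to 4, so it returns the first matching category's block directly via next() over a category table, eliminating A's accumulate-extend passes, the empty-check default rebind and the final slice.
import Mathlib
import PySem

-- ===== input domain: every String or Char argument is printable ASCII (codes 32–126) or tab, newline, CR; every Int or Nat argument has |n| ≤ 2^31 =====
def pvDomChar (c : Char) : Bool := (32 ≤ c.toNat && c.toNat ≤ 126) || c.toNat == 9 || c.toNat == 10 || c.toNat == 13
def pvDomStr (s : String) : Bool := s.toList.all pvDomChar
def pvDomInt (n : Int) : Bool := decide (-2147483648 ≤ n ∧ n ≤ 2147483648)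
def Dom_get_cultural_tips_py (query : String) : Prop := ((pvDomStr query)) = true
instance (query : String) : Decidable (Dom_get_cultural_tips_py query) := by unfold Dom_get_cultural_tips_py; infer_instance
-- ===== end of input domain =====

-- B returns the first matching category's block directly (every block has exactly 4 tips, so A's
-- extend-then-slice-to-4 always yields the first matching block); simpler, same cost.
-- ===== PORT A =====
def get_cultural_tips_py (query : String) : List String :=
  let tips : List String := []
  let query_lower := PySem.Str.lower query
  let tips := if (["temple", "monastery", "dzong", "religious"].any
      (fun word => PySem.Str.isIn word query_lower)) then
    tips ++ ["Dress modestly when visiting religious sites",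
             "Remove shoes before entering temple halls",
             "Walk clockwise around religious monuments",
             "Do not point at religious objects"]
  else tips
  let tips := if (["festival", "celebration", "ceremony"].any
      (fun word => PySem.Str.isIn word query_lower)) then
    tips ++ ["Festivals are deeply spiritual occasions",
             "Photography may be restricted in some areas",
             "Participate respectfully as an observer",
             "Ask permission before taking photos of people"]
  else tips
  let tips := if (["food", "dining", "meal"].any
      (fun word => PySem.Str.isIn word query_lower)) then
    tips ++ ["Try traditional dishes like ema datshi",
             "Meals are often shared communally",
             "Use your right hand for eating",
             "Spicy food is common in Bhutanese cuisine"]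
  else tips
  let tips := if tips = [] then
    ["Respect local customs and traditions",
     "Dress modestly, especially in rural areas",
     "Be mindful of environmental conservation",
     "Support local communities and businesses"]
  else tips
  PySem.List.slice tips none (some 4)

-- ===== PORT B =====
def pvCategories : List (List String × List String) :=
  [(["temple", "monastery", "dzong", "religious"],
    ["Dress modestly when visiting religious sites",
     "Remove shoes before entering temple halls",
     "Walk clockwise around religious monuments",
     "Do not point at religious objects"]),
   (["festival", "celebration", "ceremony"],
    ["Festivals are deeply spiritual occasions",
     "Photography may be restricted in some areas",
     "Participate respectfully as an observer",
     "Ask permission before taking photos of people"]),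
   (["food", "dining", "meal"],
    ["Try traditional dishes like ema datshi",
     "Meals are often shared communally",
     "Use your right hand for eating",
     "Spicy food is common in Bhutanese cuisine"])]

def pvDefaultTips : List String :=
  ["Respect local customs and traditions",
   "Dress modestly, especially in rural areas",
   "Be mindful of environmental conservation",
   "Support local communities and businesses"]

-- first category whose keywords match, else the defaults (B's next(..., default))
def pvFirstMatch (q : String) : List (List String × List String) → List String
  | [] => pvDefaultTips
  | (kws, tips) :: rest =>
      if kws.any (fun word => PySem.Str.isIn word q) then tips else pvFirstMatch q rest

def get_cultural_tips_py_alt (query : String) : List String :=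
  pvFirstMatch (PySem.Str.lower query) pvCategories

-- ===== PRECONDITION & SPEC =====
def Spec_get_cultural_tips_py (query : String) (out : List String) : Prop := out = get_cultural_tips_py_alt query
instance (query : String) (out : List String) : Decidable (Spec_get_cultural_tips_py query out) := by unfold Spec_get_cultural_tips_py; infer_instance

-- ===== CLAIM (what is proved, stated in full; the proofs are below) =====
def Claim_equal_get_cultural_tips_py : Prop := ∀ (query : String), Dom_get_cultural_tips_py query → Spec_get_cultural_tips_py query (get_cultural_tips_py query)

-- ===== LEMMAS AND PROOFS =====

-- ===== VERDICT (by name: the statement is the Claim_ definition above) =====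
theorem get_cultural_tips_py_spec : Claim_equal_get_cultural_tips_py := by
  intro query _
  unfold Spec_get_cultural_tips_py get_cultural_tips_py get_cultural_tips_py_alt
  simp only [pvCategories, pvFirstMatch, pvDefaultTips]
  split_ifs <;> simp_all [PySem.List.slice]
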